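-- pv_equiv track=rewrite | github.com/youssef-e/Pytesseract-Opencv | src/ocr.py | mean_mrz
-- ===== SOURCE A (Python) =====
-- def mean_length_mrz(words):
--     mean_lengths=[]
--     max_occur=0
--     mean_length=0
--     for word in words:
--         if word != "-1":
--             mean_lengths.append(len(word))
--     for length in mean_lengths:
--         if(length == 36):
--             return  length
--         if(max_occur<mean_lengths.count(length)):
--             max_occur=mean_lengths.count(length)
--             mean_length = length
--         if(isinstance(mean_length,str)):
--             mean_length = 0
--     return mean_length
--
-- def mean_mrz(words):
--     mean_len = mean_length_mrz(words)
--     final_word = ""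
--     for i in range(mean_len):
--         chars={}
--         for word in words:
--             if len(word) == mean_len:
--                 if word[i] in chars:
--                     if(len(words)>16 and (words[17]==word)):
--                         chars[word[i]] =chars[word[i]] + 3
--                     else:
--                         chars[word[i]] = chars[word[i]] + 1
--                 else:
--                     if(len(words)>16 and (words[17]==word)):
--                         chars[word[i]] = 3
--                     else:
--                         chars[word[i]] = 1
--         max_val=-1
--         key=""
--         for c in chars:
--             if c == "<" or c=="(" or c == "[" or c == "{":
--                 key = "<"
--                 break
--             elif ((c == "S" or c == "C") and ( i-1 >= 0 and len(final_word) !=0) and (final_word[i-1] == "<")):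
--                 key = "<"
--                 break
--             elif chars[c]>=max_val:
--                 max_val=chars[c]
--                 key = c
--         final_word = final_word + key
--     return final_word
-- ===== SOURCE B (Python) =====
-- def mean_length_mrz(words):
--     # kept verbatim from the original module: the common word length
--     mean_lengths=[]
--     max_occur=0
--     mean_length=0
--     for word in words:
--         if word != "-1":
--             mean_lengths.append(len(word))
--     for length in mean_lengths:
--         if(length == 36):
--             return  length
--         if(max_occur<mean_lengths.count(length)):
--             max_occur=mean_lengths.count(length)
--             mean_length = length
--         if(isinstance(mean_length,str)):
--             mean_length = 0
--     return mean_length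
--
--
-- def mean_mrz(words):
--     # one pass over the words builds every column's counter at once; a second
--     # left-to-right pass picks each column's character with the original rules
--     mean_len = mean_length_mrz(words)
--     boost = words[17] if len(words) > 17 else None
--     cols = [{} for _ in range(mean_len)]
--     for word in words:
--         if len(word) == mean_len:
--             w = 3 if word == boost else 1
--             for i, ch in enumerate(word):
--                 cols[i][ch] = cols[i].get(ch, 0) + w
--     final_word = ""
--     for i in range(mean_len):
--         chars = cols[i]
--         max_val = -1
--         key = ""
--         for c in chars:
--             if c == "<" or c == "(" or c == "[" or c == "{":
--                 key = "<"
--                 break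
--             elif (c == "S" or c == "C") and (i - 1 >= 0 and len(final_word) != 0) and (final_word[i - 1] == "<"):
--                 key = "<"
--                 break
--             elif chars[c] >= max_val:
--                 max_val = chars[c]
--                 key = c
--         final_word = final_word + key
--     return final_word
-- ===== Notes on version B (the rewrite author's own statement) =====
-- stated objective: alternative
-- what changed: B replaces A's per-column rescan of the whole word list (a fresh dict rebuilt for each of the mean_len columns) by a single pass over the words that builds all per-column count dicts at once, followed by a separate left-to-right selection pass over the prebuilt columns; the words[17] weight is precomputed once as a boost value.
import Mathlib
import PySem

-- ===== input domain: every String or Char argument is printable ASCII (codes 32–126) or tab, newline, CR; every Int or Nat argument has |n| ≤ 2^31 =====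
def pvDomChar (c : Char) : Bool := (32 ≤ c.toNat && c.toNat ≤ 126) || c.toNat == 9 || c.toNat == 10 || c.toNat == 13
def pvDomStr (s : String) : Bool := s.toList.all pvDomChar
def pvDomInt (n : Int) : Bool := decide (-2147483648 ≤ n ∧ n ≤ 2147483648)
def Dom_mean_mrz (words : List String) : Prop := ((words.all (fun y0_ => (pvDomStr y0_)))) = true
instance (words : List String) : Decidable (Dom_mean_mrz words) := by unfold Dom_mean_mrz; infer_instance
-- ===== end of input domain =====

-- B builds all per-column vote dicts in ONE pass over the words instead of A's per-column
-- rescan of the whole word list; the selection pass keeps A's rules unchanged (objective: alternative, same cost).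

-- ===== PORT A =====
-- helper kept verbatim in both Pythons: the counting loop of mean_length_mrz (early return on 36)
def pvMeanLenLoop (all : List Int) : List Int → Int → Int → Int
  | [], _, ml => ml
  | l :: rest, mo, ml =>
    if l == 36 then l
    else
      let c : Int := (PySem.List.count all l : Int)
      if mo < c then pvMeanLenLoop all rest c l   -- isinstance(mean_length, str) is always False: no-op
      else pvMeanLenLoop all rest mo ml

def mean_length_mrz (words : List String) : Int :=
  let mean_lengths := words.foldl (fun acc w => if w != "-1" then acc ++ [(PySem.Str.len w : Int)] else acc) []
  pvMeanLenLoop mean_lengths mean_lengths 0 0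

-- A's repeated weight condition 'len(words)>16 and words[17]==word'
-- (words[17] via pyGet?: Python raises IndexError at len(words)=17, which Pre_ excludes)
def pvBoostA (words : List String) (word : String) : Bool :=
  decide ((16:Int) < (words.length : Int)) && (PySem.List.pyGet? words 17 == some word)

-- A's inner per-column dict-building loop body
def pvStepA (words : List String) (mean_len i : Int) (chars : PySem.Dict Char Int) (word : String) : PySem.Dict Char Int :=
  if ((PySem.Str.len word : Int) == mean_len) then
    match PySem.Str.pyGet? word i with   -- word[i]; in range whenever Python reaches it (i < mean_len = len(word))
    | none => chars
    | some ch =>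
      if chars.contains ch then
        if pvBoostA words word then chars.insert ch (chars.getD ch 0 + 3)
        else chars.insert ch (chars.getD ch 0 + 1)
      else
        if pvBoostA words word then chars.insert ch 3
        else chars.insert ch 1
  else chars

-- the 'for c in chars' selection loop with break — textually identical in A and B, shared
def pvPickKey (i : Int) (final_word : String) : List (Char × Int) → Int → String → String
  | [], _, key => key
  | (c, v) :: rest, max_val, key =>
    if c == '<' || c == '(' || c == '[' || c == '{' then "<"
    else if (c == 'S' || c == 'C') && (decide (0 ≤ i - 1) && !(PySem.Str.len final_word == 0))
            && (PySem.Str.pyGet? final_word (i - 1) == some '<') then "<"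
    else if v ≥ max_val then pvPickKey i final_word rest v (String.ofList [c])
    else pvPickKey i final_word rest max_val key

def mean_mrz (words : List String) : String :=
  let mean_len := mean_length_mrz words
  (PySem.List.pyRange 0 mean_len 1).foldl (fun final_word i =>
    let chars := words.foldl (pvStepA words mean_len i) PySem.Dict.empty
    final_word ++ pvPickKey i final_word chars.items (-1) "") ""

-- ===== PORT B =====
-- B's single pass: for each qualifying word update every column ('for i, ch in enumerate(word)')
def pvStepB (boost : Option String) (mean_len : Int) (cols : List (PySem.Dict Char Int)) (word : String) : List (PySem.Dict Char Int) :=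
  if ((PySem.Str.len word : Int) == mean_len) then
    let w : Int := if boost == some word then 3 else 1
    (cols.zip word.toList).map (fun p => p.1.insert p.2 (p.1.getD p.2 0 + w))
  else cols

def mean_mrz_alt (words : List String) : String :=
  let mean_len := mean_length_mrz words   -- B keeps A's mean-length computation (same helper)
  let boost : Option String := PySem.List.pyGet? words 17   -- words[17] if len(words) > 17 else None
  let cols := words.foldl (pvStepB boost mean_len) (List.replicate mean_len.toNat PySem.Dict.empty)
  (PySem.List.pyRange 0 mean_len 1).foldl (fun final_word i =>
    let chars := PySem.List.pyGetD cols i PySem.Dict.empty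
    final_word ++ pvPickKey i final_word chars.items (-1) "") ""

-- ===== PRECONDITION & SPEC =====
-- Pre_ excludes lists of exactly 17 words: there Python A evaluates words[17] and raises
-- IndexError whenever the column loop processes any word (A returns only on degenerate
-- length-17 inputs whose common word length is 0, where B returns the same "").
def Pre_mean_mrz (words : List String) : Prop := words.length ≠ 17
instance (words : List String) : Decidable (Pre_mean_mrz words) := by unfold Pre_mean_mrz; infer_instance
def pvWitness_mean_mrz : List String := ["ab", "ab", "cb"]

def Spec_mean_mrz (words : List String) (out : String) : Prop := out = mean_mrz_alt words
instance (words : List String) (out : String) : Decidable (Spec_mean_mrz words out) := by unfold Spec_mean_mrz; infer_instance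

-- ===== CLAIM (what is proved, stated in full; the proofs are below) =====
def Claim_equal_mean_mrz : Prop := ∀ (words : List String), Dom_mean_mrz words → Pre_mean_mrz words → Spec_mean_mrz words (mean_mrz words)

-- ===== LEMMAS AND PROOFS =====

-- A's weight condition equals B's: for len(words) ≤ 17 the port's pyGet? words 17 is none anyway
lemma pvBoost_eq (words : List String) (word : String) :
    pvBoostA words word = (PySem.List.pyGet? words 17 == some word) := by
  unfold pvBoostA
  have h17 : PySem.List.pyGet? words (17:Int) = words[17]? := by
    have := PySem.List.pyGet?_natCast words 17; simpa using this
  rw [h17]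
  rcases h : words[17]? with _ | w
  · simp
  · have h' := List.getElem?_eq_some_iff.mp h
    simp only [Bool.and_eq_right_iff_imp]
    intro _
    have : (17:ℕ) < words.length := h'.1
    simp; omega

-- A's contains/else branches collapse to one get-default-and-add update
lemma pvStepA_collapse (words : List String) (n i : Int) (chars : PySem.Dict Char Int) (word : String) :
    pvStepA words n i chars word =
      if ((PySem.Str.len word : Int) == n) then
        match PySem.Str.pyGet? word i with
        | none => chars
        | some ch => chars.insert ch (chars.getD ch 0 + (if PySem.List.pyGet? words 17 == some word then 3 else 1))
      else chars := by
  unfold pvStepA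
  rw [pvBoost_eq]
  split
  · cases hg : PySem.Str.pyGet? word i with
    | none => rfl
    | some ch =>
      dsimp only
      by_cases hc : chars.contains ch = true
      · rw [if_pos hc]; split <;> rfl
      · rw [if_neg hc]
        have h0 : chars.getD ch 0 = 0 :=
          PySem.Dict.getD_of_not_contains chars 0 (by simpa using hc)
        rw [h0]; split <;> norm_num
  · rfl

-- the single-pass column build, read at column i, is exactly A's per-column fold
lemma pvFoldB_get (b : Option String) (n : Int)
    (stepA : PySem.Dict Char Int → String → PySem.Dict Char Int) (i : Nat) (hi : i < n.toNat)
    (hstep : ∀ (d : PySem.Dict Char Int) (word : String),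
      stepA d word = if ((PySem.Str.len word : Int) == n) then
          match PySem.Str.pyGet? word (i : Int) with
          | none => d
          | some ch => d.insert ch (d.getD ch 0 + (if b == some word then 3 else 1))
        else d) :
    ∀ (ws : List String) (cols : List (PySem.Dict Char Int)), cols.length = n.toNat →
      (ws.foldl (pvStepB b n) cols).length = n.toNat ∧
      (ws.foldl (pvStepB b n) cols)[i]? = (cols[i]?).map (fun d => ws.foldl stepA d) := by
  intro ws
  induction ws with
  | nil =>
    intro cols hc
    refine ⟨hc, ?_⟩
    simp
  | cons w ws ih =>
    intro cols hc
    have hone : (pvStepB b n cols w).length = n.toNat ∧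
        (pvStepB b n cols w)[i]? = (cols[i]?).map (fun d => stepA d w) := by
      unfold pvStepB
      by_cases hl : ((PySem.Str.len w : Int) == n) = true
      · rw [if_pos hl]
        have hwl : w.toList.length = n.toNat := by
          have : (PySem.Str.len w : Int) = n := by exact_mod_cast of_decide_eq_true (by simpa using hl)
          simp only [PySem.Str.len_eq] at this
          omega
        have hlen : ((cols.zip w.toList).map
            (fun p => p.1.insert p.2 (p.1.getD p.2 0 + if b == some w then 3 else 1))).length = n.toNat := by
          simp [hc, hwl]
        refine ⟨hlen, ?_⟩
        have hic : i < cols.length := by omega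
        have hiw : i < w.toList.length := by omega
        have hiz : i < (cols.zip w.toList).length := by simp [hc, hwl]; omega
        rw [List.getElem?_eq_getElem (by simpa using hiz), List.getElem?_eq_getElem hic]
        simp only [List.getElem_map, List.getElem_zip, Option.map_some]
        rw [hstep]
        rw [if_pos hl]
        have : PySem.Str.pyGet? w (i : Int) = some w.toList[i] := by
          simp [List.getElem?_eq_getElem hiw]
        rw [this]
      · rw [if_neg hl]
        refine ⟨hc, ?_⟩
        have : ∀ d, stepA d w = d := by
          intro d; rw [hstep, if_neg hl]
        cases hg : cols[i]? with
        | none => simp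
        | some d => simp [this]
    have := ih (pvStepB b n cols w) hone.1
    refine ⟨by simpa using this.1, ?_⟩
    simp only [List.foldl_cons]
    rw [this.2, hone.2, Option.map_map]
    rfl

-- the two ports agree: the range folds have equal bodies at every column index
lemma pv_main (words : List String) : mean_mrz words = mean_mrz_alt words := by
  unfold mean_mrz mean_mrz_alt
  dsimp only
  apply PySem.List.foldl_congr_mem'
  intro x hx acc
  have hx' := (PySem.List.mem_pyRange_one).mp hx
  congr 1
  set n := mean_length_mrz words with hn
  set b : Option String := PySem.List.pyGet? words 17 with hb
  have hx0 : 0 ≤ x := hx'.1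
  have hxn : x < n := hx'.2
  have hi : x.toNat < n.toNat := by omega
  have hxx : (x.toNat : Int) = x := by omega
  have hstepAeq : pvStepA words n x = (fun d word =>
      if ((PySem.Str.len word : Int) == n) then
        match PySem.Str.pyGet? word ((x.toNat : Nat) : Int) with
        | none => d
        | some ch => d.insert ch (d.getD ch 0 + (if b == some word then 3 else 1))
      else d) := by
    funext d word
    rw [pvStepA_collapse]
    rw [hxx]
  have hmain := pvFoldB_get b n _ x.toNat hi (fun d word => rfl) words
      (List.replicate n.toNat PySem.Dict.empty) (by simp)
  rw [hstepAeq]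
  have hrep : (List.replicate n.toNat (PySem.Dict.empty (κ := Char) (ν := Int)))[x.toNat]? = some PySem.Dict.empty := by
    simp [hi]
  rw [hrep] at hmain
  have hget := hmain.2
  have : PySem.List.pyGetD (words.foldl (pvStepB b n) (List.replicate n.toNat PySem.Dict.empty)) x PySem.Dict.empty
      = words.foldl (fun d word =>
      if ((PySem.Str.len word : Int) == n) then
        match PySem.Str.pyGet? word ((x.toNat : Nat) : Int) with
        | none => d
        | some ch => d.insert ch (d.getD ch 0 + (if b == some word then 3 else 1))
      else d) (PySem.Dict.empty : PySem.Dict Char Int) := by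
    rw [← hxx]
    rw [PySem.List.pyGetD_natCast]
    rw [List.getD_eq_getElem?_getD, hget]
    rfl
  rw [this]

-- ===== VERDICT (by name: the statement is the Claim_ definition above) =====
theorem mean_mrz_spec : Claim_equal_mean_mrz := by
  intro words _ _
  exact pv_main words
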